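-- pv_equiv track=rewrite | github.com/ruaan-deysel/ha-unifi-insights | custom_components/unifi_insights/config_flow.py | _normalize_remote_console_id
-- ===== SOURCE A (Python) =====
-- def _normalize_remote_console_id(
--     console_id: str,
--     discovered_consoles: dict[str, str],
-- ) -> str | None:
--     """Normalize manual or stored console IDs against discovered host IDs."""
--     candidate = console_id.strip()
--     if not candidate:
--         return None
--
--     lowered_candidate = candidate.lower()
--     for discovered_id in discovered_consoles:
--         lowered_discovered = discovered_id.lower()
--         if lowered_candidate == lowered_discovered:
--             return discovered_id
--
--         discovered_prefix = lowered_discovered.split(":", 1)[0]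
--         if lowered_candidate == discovered_prefix:
--             return discovered_id
--
--     return None
-- ===== SOURCE B (Python) =====
-- def _normalize_remote_console_id(
--     console_id: str,
--     discovered_consoles: dict[str, str],
-- ) -> str | None:
--     """Normalize manual or stored console IDs against discovered host IDs."""
--     candidate = console_id.strip()
--     if not candidate:
--         return None
--
--     table = {}
--     for discovered_id in discovered_consoles:
--         lowered = discovered_id.lower()
--         table.setdefault(lowered, discovered_id)
--         table.setdefault(lowered.split(":", 1)[0], discovered_id)
--     return table.get(candidate.lower())
-- ===== Notes on version B (the rewrite author's own statement) =====
-- stated objective: idiomatic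
-- what changed: Replaces the early-return linear scan (two comparisons per entry) with a first-wins lookup table built in one pass (setdefault for the lowered id and its ':'-prefix), followed by a single dict lookup.
import Mathlib
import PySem

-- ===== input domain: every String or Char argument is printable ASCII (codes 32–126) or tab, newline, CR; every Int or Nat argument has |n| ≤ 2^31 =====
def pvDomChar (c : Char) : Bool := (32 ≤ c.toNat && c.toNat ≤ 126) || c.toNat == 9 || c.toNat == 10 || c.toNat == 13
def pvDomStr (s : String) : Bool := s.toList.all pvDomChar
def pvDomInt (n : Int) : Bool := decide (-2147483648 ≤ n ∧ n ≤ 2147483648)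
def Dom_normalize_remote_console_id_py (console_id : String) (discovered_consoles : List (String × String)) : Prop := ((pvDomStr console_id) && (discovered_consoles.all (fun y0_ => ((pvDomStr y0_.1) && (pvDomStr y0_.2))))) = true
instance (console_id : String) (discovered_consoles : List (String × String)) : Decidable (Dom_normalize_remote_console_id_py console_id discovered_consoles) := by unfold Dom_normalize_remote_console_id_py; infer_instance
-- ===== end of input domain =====

-- ===== PORT A =====
-- B builds a first-wins lookup table once and does a single dict lookup instead of A's early-return scan (idiomatic; same cost).

-- shared helper: s.split(":", 1)[0]  (both Pythons compute exactly this)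
def pvColonPrefix (s : String) : String :=
  match PySem.Str.splitMax? s ":" 1 with
  | some (p :: _) => p
  | _ => s

def pvScanA (lc : String) : List (String × String) → Option String
  | [] => none
  | (did, _) :: rest =>
    let ld := PySem.Str.lower did
    if lc == ld then some did
    else if lc == pvColonPrefix ld then some did
    else pvScanA lc rest

def normalize_remote_console_id_py (console_id : String) (discovered_consoles : List (String × String)) : Option String :=
  let candidate := PySem.Str.strip console_id
  if candidate == "" then none
  else pvScanA (PySem.Str.lower candidate) discovered_consoles

-- ===== PORT B =====
def pvStepB (d : PySem.Dict String String) (p : String × String) : PySem.Dict String String :=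
  let lowered := PySem.Str.lower p.1
  (d.setdefault lowered p.1).setdefault (pvColonPrefix lowered) p.1

def pvTableB (discovered_consoles : List (String × String)) : PySem.Dict String String :=
  discovered_consoles.foldl pvStepB PySem.Dict.empty

def normalize_remote_console_id_py_alt (console_id : String) (discovered_consoles : List (String × String)) : Option String :=
  let candidate := PySem.Str.strip console_id
  if candidate == "" then none
  else (pvTableB discovered_consoles).get? (PySem.Str.lower candidate)

-- ===== PRECONDITION & SPEC =====
def Spec_normalize_remote_console_id_py (console_id : String) (discovered_consoles : List (String × String)) (out : Option String) : Prop := out = normalize_remote_console_id_py_alt console_id discovered_consoles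
instance (console_id : String) (discovered_consoles : List (String × String)) (out : Option String) : Decidable (Spec_normalize_remote_console_id_py console_id discovered_consoles out) := by unfold Spec_normalize_remote_console_id_py; infer_instance

-- ===== CLAIM (what is proved, stated in full; the proofs are below) =====
def Claim_equal_normalize_remote_console_id_py : Prop := ∀ (console_id : String) (discovered_consoles : List (String × String)), Dom_normalize_remote_console_id_py console_id discovered_consoles → Spec_normalize_remote_console_id_py console_id discovered_consoles (normalize_remote_console_id_py console_id discovered_consoles)

-- ===== LEMMAS AND PROOFS =====

theorem pvScanA_nil (lc : String) : pvScanA lc [] = none := rfl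

-- lookup after a setdefault: the old value if present, else the new binding when the keys match
theorem pvGet?_setdefault (d : PySem.Dict String String) (k v x : String) :
    (d.setdefault k v).get? x = ((d.get? x).or (if x = k then some v else none)) := by
  cases hc : d.contains k with
  | true =>
    rw [PySem.Dict.setdefault_of_contains d v hc]
    by_cases hx : x = k
    · subst hx
      rcases hg : d.get? x with _ | w
      · rw [PySem.Dict.contains_eq_isSome_get?, hg] at hc; simp at hc
      · simp
    · simp [hx]
  | false =>
    rw [PySem.Dict.setdefault_of_not_contains d v hc, PySem.Dict.get?_insert]
    by_cases hx : x = k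
    · subst hx
      have hg : d.get? x = none := by
        rcases hg : d.get? x with _ | w
        · rfl
        · rw [PySem.Dict.contains_eq_isSome_get?, hg] at hc; simp at hc
      simp [hg]
    · simp [hx]

-- one fold step = one scan step, merged behind the accumulator's own bindings
theorem pvStep_get? (lc did v : String) (d : PySem.Dict String String) :
    (pvStepB d (did, v)).get? lc = ((d.get? lc).or (pvScanA lc [(did, v)])) := by
  unfold pvStepB pvScanA
  rw [pvGet?_setdefault, pvGet?_setdefault, Option.or_assoc]
  by_cases h1 : lc = PySem.Str.lower did
  · simp [h1]
  · by_cases h2 : lc = pvColonPrefix (PySem.Str.lower did)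
    · have h3 : ¬ pvColonPrefix (PySem.Str.lower did) = PySem.Str.lower did :=
        fun he => h1 (h2.trans he)
      cases d.get? lc <;> simp [h2, h3]
    · simp [h1, h2, pvScanA_nil]

-- scanning a cons = scanning the head alone, else the tail
theorem pvScanA_cons (lc did v : String) (rest : List (String × String)) :
    pvScanA lc ((did, v) :: rest) = ((pvScanA lc [(did, v)]).or (pvScanA lc rest)) := by
  simp only [pvScanA]
  by_cases h1 : lc = PySem.Str.lower did
  · simp [h1]
  · by_cases h2 : lc = pvColonPrefix (PySem.Str.lower did)
    · simp [h2]
    · simp [h1, h2]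

-- the fold over setdefaults from accumulator d: existing keys keep their value, a missing key gets the first-match value
theorem pvFold_get? (lc : String) (l : List (String × String)) :
    ∀ d : PySem.Dict String String,
      (l.foldl pvStepB d).get? lc = ((d.get? lc).or (pvScanA lc l)) := by
  induction l with
  | nil => intro d; simp [pvScanA]
  | cons p rest ih =>
    intro d
    rcases p with ⟨did, v⟩
    rw [List.foldl_cons, ih, pvStep_get?, Option.or_assoc]
    conv_rhs => rw [pvScanA_cons]

theorem pvScan_eq_table (lc : String) (l : List (String × String)) :
    pvScanA lc l = (pvTableB l).get? lc := by
  rw [pvTableB, pvFold_get? lc l PySem.Dict.empty]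
  simp

-- ===== VERDICT (by name: the statement is the Claim_ definition above) =====
theorem normalize_remote_console_id_py_spec : Claim_equal_normalize_remote_console_id_py := by
  intro console_id dcs _
  unfold Spec_normalize_remote_console_id_py normalize_remote_console_id_py normalize_remote_console_id_py_alt
  by_cases h : PySem.Str.strip console_id == ""
  · simp [h]
  · simp [h, pvScan_eq_table]
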